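-- pv_equiv track=rewrite | github.com/AllanB3/nls-semantic-tagging | parsing/data-correction/spellchecker.py | edits
-- ===== SOURCE A (Python) =====
-- def edits(word):
-- 	alphabet = 'abcdefghijklmnopqrstuvwxyz'
-- 	s = [(word[:i], word[i:]) for i in range(len(word) + 1)]
-- 	deletes = [a + b[1:] for a, b in s if b]
-- 	transposes = [a + b[1] + b[0] + b[2:] for a, b in s if len(b) > 1]
-- 	replaces = [a + c + b[1:] for a,b in s for c in alphabet if b]
-- 	inserts = [a + c + b for a,b in s for c in alphabet]
-- 	return set(deletes + transposes + replaces + inserts)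
-- ===== SOURCE B (Python) =====
-- def edits(word):
-- 	alphabet = 'abcdefghijklmnopqrstuvwxyz'
--
-- 	def dels(cs):
-- 		if not cs:
-- 			return []
-- 		h, t = cs[0], cs[1:]
-- 		return [t] + [[h] + r for r in dels(t)]
--
-- 	def trans(cs):
-- 		if len(cs) < 2:
-- 			return []
-- 		x, y, t = cs[0], cs[1], cs[2:]
-- 		return [[y, x] + t] + [[x] + r for r in trans([y] + t)]
--
-- 	def reps(cs):
-- 		if not cs:
-- 			return []
-- 		h, t = cs[0], cs[1:]
-- 		return [[c] + t for c in alphabet] + [[h] + r for r in reps(t)]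
--
-- 	def ins(cs):
-- 		if not cs:
-- 			return [[c] for c in alphabet]
-- 		h, t = cs[0], cs[1:]
-- 		return [[c] + cs for c in alphabet] + [[h] + r for r in ins(t)]
--
-- 	cs = list(word)
-- 	return set(''.join(v) for v in dels(cs) + trans(cs) + reps(cs) + ins(cs))
-- ===== Notes on version B (the rewrite author's own statement) =====
-- stated objective: simpler
-- what changed: A builds a table of all (prefix, suffix) splits and then runs four separate slicing comprehensions over it plus a set union; B drops the splits table entirely and generates each of the four candidate families (deletes, transposes, replaces, inserts) by a direct structural recursion on the character list, collecting them into one set.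
import Mathlib
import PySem

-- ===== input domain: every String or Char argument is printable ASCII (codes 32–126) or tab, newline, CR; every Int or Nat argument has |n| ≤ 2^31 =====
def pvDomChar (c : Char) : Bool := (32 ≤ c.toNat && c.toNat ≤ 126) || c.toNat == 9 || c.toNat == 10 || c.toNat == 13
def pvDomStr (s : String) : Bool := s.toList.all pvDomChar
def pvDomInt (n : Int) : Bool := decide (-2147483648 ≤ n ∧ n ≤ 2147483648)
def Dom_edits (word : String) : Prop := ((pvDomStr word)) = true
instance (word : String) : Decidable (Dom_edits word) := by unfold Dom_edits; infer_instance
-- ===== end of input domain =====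

-- B replaces A's splits table and four slicing comprehensions by four structural recursions
-- over the character list (objective: simpler decomposition, same cost).
-- Ports: Python string concatenation/slicing is ported over List Char (PySem.Chars convention),
-- with String.ofList applied once at the end — exact on the domain.

-- ===== PORT A =====
def edits (word : String) : List String :=
  let alphabet := "abcdefghijklmnopqrstuvwxyz".toList
  let w := word.toList
  let s := (PySem.List.pyRange 0 ((w.length : Int) + 1) 1).map
      (fun i => (PySem.List.slice w none (some i), PySem.List.slice w (some i) none))
  let deletes := s.filterMap
      (fun p => if p.2.isEmpty then none
                else some (p.1 ++ PySem.List.slice p.2 (some 1) none))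
  let transposes := s.filterMap
      (fun p => if 1 < p.2.length then
                  some (p.1 ++ [PySem.List.pyGetD p.2 1 ' '] ++ [PySem.List.pyGetD p.2 0 ' ']
                        ++ PySem.List.slice p.2 (some 2) none)
                else none)
  let replaces := s.flatMap
      (fun p => alphabet.filterMap
        (fun c => if p.2.isEmpty then none
                  else some (p.1 ++ [c] ++ PySem.List.slice p.2 (some 1) none)))
  let inserts := s.flatMap (fun p => alphabet.map (fun c => p.1 ++ [c] ++ p.2))
  PySem.Set.ofList ((deletes ++ transposes ++ replaces ++ inserts).map String.ofList)

-- ===== PORT B =====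
def pvAlphabet : List Char := "abcdefghijklmnopqrstuvwxyz".toList

def pvDels : List Char → List (List Char)
  | [] => []
  | h :: t => t :: (pvDels t).map (fun r => h :: r)

def pvTrans : List Char → List (List Char)
  | x :: y :: t => (y :: x :: t) :: (pvTrans (y :: t)).map (fun r => x :: r)
  | _ => []
termination_by cs => cs.length

def pvReps : List Char → List (List Char)
  | [] => []
  | h :: t => pvAlphabet.map (fun c => c :: t) ++ (pvReps t).map (fun r => h :: r)

def pvIns : List Char → List (List Char)
  | [] => pvAlphabet.map (fun c => [c])
  | h :: t => pvAlphabet.map (fun c => c :: h :: t) ++ (pvIns t).map (fun r => h :: r)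

def edits_alt (word : String) : List String :=
  let cs := word.toList
  PySem.Set.ofList ((pvDels cs ++ pvTrans cs ++ pvReps cs ++ pvIns cs).map String.ofList)

-- ===== PRECONDITION & SPEC =====
def Spec_edits (word : String) (out : List String) : Prop := out = edits_alt word
instance (word : String) (out : List String) : Decidable (Spec_edits word out) := by unfold Spec_edits; infer_instance

-- ===== CLAIM (what is proved, stated in full; the proofs are below) =====
def Claim_equal_edits : Prop := ∀ (word : String), Dom_edits word → Spec_edits word (edits word)

-- ===== LEMMAS AND PROOFS =====

-- A's splits table, on the list side
def pvSplits (cs : List Char) : List (List Char × List Char) :=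
  (List.range (cs.length + 1)).map (fun i => (cs.take i, cs.drop i))

theorem pvSplits_eq (cs : List Char) :
    (PySem.List.pyRange 0 ((cs.length : Int) + 1) 1).map
      (fun i => (PySem.List.slice cs none (some i), PySem.List.slice cs (some i) none))
      = pvSplits cs := by
  rw [PySem.List.pyRange_one]
  simp [pvSplits, List.map_map, Function.comp]

theorem pvSplits_cons (h : Char) (t : List Char) :
    pvSplits (h :: t) = ([], h :: t) :: (pvSplits t).map (fun p => (h :: p.1, p.2)) := by
  simp [pvSplits, List.range_succ_eq_map, List.map_map, Function.comp]

theorem pvDels_eq (cs : List Char) :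
    (pvSplits cs).filterMap
      (fun p => if p.2.isEmpty then none
                else some (p.1 ++ PySem.List.slice p.2 (some 1) none)) = pvDels cs := by
  induction cs with
  | nil => simp [pvSplits, pvDels]
  | cons h t ih =>
    simp only [PySem.List.slice_from_one] at ih ⊢
    rw [pvSplits_cons, List.filterMap_cons, List.filterMap_map]
    have hhead : (if (h :: t).isEmpty = true then (none : Option (List Char))
        else some ([] ++ (h :: t).tail)) = some t := by simp
    rw [hhead]
    show t :: _ = _
    rw [show pvDels (h :: t) = t :: (pvDels t).map (fun r => h :: r) from rfl, ← ih,
      List.map_filterMap]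
    refine congrArg (t :: ·) ?_
    refine congrArg (fun f => List.filterMap f (pvSplits t)) ?_
    funext p
    by_cases hp : p.2 = [] <;> simp [hp, Function.comp]

theorem pvTrans_eq (cs : List Char) :
    (pvSplits cs).filterMap
      (fun p => if 1 < p.2.length then
                  some (p.1 ++ [PySem.List.pyGetD p.2 1 ' '] ++ [PySem.List.pyGetD p.2 0 ' ']
                        ++ PySem.List.slice p.2 (some 2) none)
                else none) = pvTrans cs := by
  induction cs with
  | nil => simp [pvSplits, pvTrans]
  | cons x t ih =>
    cases t with
    | nil => simp [pvSplits, pvTrans, List.range_succ]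
    | cons y t' =>
      rw [pvSplits_cons, List.filterMap_cons, List.filterMap_map]
      have hslice : PySem.List.slice (x :: y :: t') (some 2) none = t' := by
        simp [pysem]
      have hhead : (if 1 < (x :: y :: t').length then
          some (([] : List Char) ++ [PySem.List.pyGetD (x :: y :: t') 1 ' ']
            ++ [PySem.List.pyGetD (x :: y :: t') 0 ' ']
            ++ PySem.List.slice (x :: y :: t') (some 2) none)
          else none) = some (y :: x :: t') := by
        rw [hslice]
        have h0 : (0:Int) ≤ (t'.length : Int) + 1 := by positivity
        simp [PySem.List.pyGetD, PySem.List.pyGet?, PySem.List.pyIdx?, h0]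
      rw [hhead]
      show (y :: x :: t') :: _ = _
      conv_rhs => rw [pvTrans]
      rw [← ih, List.map_filterMap]
      refine congrArg ((y :: x :: t') :: ·) ?_
      refine congrArg (fun f => List.filterMap f (pvSplits (y :: t'))) ?_
      funext p
      by_cases hp : 1 < p.2.length <;> simp [hp, Function.comp]

theorem pvReps_eq (cs : List Char) :
    (pvSplits cs).flatMap
      (fun p => pvAlphabet.filterMap
        (fun c => if p.2.isEmpty then none
                  else some (p.1 ++ [c] ++ PySem.List.slice p.2 (some 1) none))) = pvReps cs := by
  induction cs with
  | nil => simp [pvSplits, pvReps]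
  | cons h t ih =>
    simp only [PySem.List.slice_from_one] at ih ⊢
    rw [pvSplits_cons, List.flatMap_cons]
    have h1 : pvAlphabet.filterMap
        (fun c => if (h :: t).isEmpty = true then none
                  else some (([] : List Char) ++ [c] ++ (h :: t).tail))
        = pvAlphabet.map (fun c => c :: t) := by
      simp
    have h2 : ((pvSplits t).map (fun p => (h :: p.1, p.2))).flatMap
        (fun p => pvAlphabet.filterMap
          (fun c => if p.2.isEmpty = true then none else some (p.1 ++ [c] ++ p.2.tail)))
        = ((pvSplits t).flatMap
            (fun p => pvAlphabet.filterMap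
              (fun c => if p.2.isEmpty = true then none
                        else some (p.1 ++ [c] ++ p.2.tail)))).map (fun r => h :: r) := by
      rw [List.flatMap_map, List.map_flatMap]
      refine congrArg (fun f => List.flatMap f (pvSplits t)) ?_
      funext p
      rw [List.map_filterMap]
      refine congrArg (fun f => List.filterMap f pvAlphabet) ?_
      funext c
      by_cases hp : p.2 = [] <;> simp [hp]
    rw [h1, h2, ih]
    rw [show pvReps (h :: t)
        = pvAlphabet.map (fun c => c :: t) ++ (pvReps t).map (fun r => h :: r) from rfl]

theorem pvIns_eq (cs : List Char) :
    (pvSplits cs).flatMap (fun p => pvAlphabet.map (fun c => p.1 ++ [c] ++ p.2)) = pvIns cs := by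
  induction cs with
  | nil => simp [pvSplits, pvIns]
  | cons h t ih =>
    rw [pvSplits_cons, List.flatMap_cons]
    have h1 : pvAlphabet.map (fun c => ([] : List Char) ++ [c] ++ (h :: t))
        = pvAlphabet.map (fun c => c :: h :: t) := by simp
    have h2 : ((pvSplits t).map (fun p => (h :: p.1, p.2))).flatMap
        (fun p => pvAlphabet.map (fun c => p.1 ++ [c] ++ p.2))
        = ((pvSplits t).flatMap
            (fun p => pvAlphabet.map (fun c => p.1 ++ [c] ++ p.2))).map (fun r => h :: r) := by
      rw [List.flatMap_map, List.map_flatMap]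
      refine congrArg (fun f => List.flatMap f (pvSplits t)) ?_
      funext p
      rw [List.map_map]
      rfl
    rw [h1, h2, ih]
    rw [show pvIns (h :: t)
        = pvAlphabet.map (fun c => c :: h :: t) ++ (pvIns t).map (fun r => h :: r) from rfl]

-- ===== VERDICT (by name: the statement is the Claim_ definition above) =====
theorem edits_spec : Claim_equal_edits := by
  intro word _
  unfold Spec_edits edits edits_alt
  simp only []
  rw [show "abcdefghijklmnopqrstuvwxyz".toList = pvAlphabet from rfl,
      pvSplits_eq, pvDels_eq, pvTrans_eq, pvReps_eq, pvIns_eq]
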